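-- pv_equiv track=rewrite | github.com/lizatinku/ECS-122A | HW3/byteland_water_supply.py | computeMinimumCost
-- ===== SOURCE A (Python) =====
-- def find(parent, u):
--     """Find with path compression."""
--     if parent[u] != u:
--         parent[u] = find(parent, parent[u])
--     return parent[u]
--
-- def union(parent, rank, u, v):
--     """Union by rank."""
--     rootU = find(parent, u)
--     rootV = find(parent, v)
--     if rootU != rootV: #only merge if they are in different sets
--         if rank[rootU] > rank[rootV]:
--             parent[rootV] = rootU
--         elif rank[rootU] < rank[rootV]:
--             parent[rootU] = rootV
--         else:
--             parent[rootV] = rootU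
--             rank[rootU] += 1
--         return True # if the union was successful
--     return False
--
-- def computeMinimumCost(weights, edges):
--     """Computes the minimum cost to rebuild ByteLand's water supply system."""
--     n = len(weights) - 1  # Number of villages
--     m = len(edges)  # Number of roads
--
--     # Initialize Disjoint Set Union (DSU) structures
--     parent = list(range(n + 1))  # +1 for virtual node 0
--     rank = [0] * (n + 1)
--
--     # Convert wells into edges (cost, 0, village)
--     well_edges = [(weights[i], 0, i) for i in range(1, n + 1) if weights[i] > 0]
--
--     # Combine road and well edges
--     all_edges = [(w, u, v) for u, v, w in edges] + well_edges
--
--     # Sort all edges by cost (because Kruskal's algorithm requires sorted edges)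
--     all_edges.sort()
--
--     cost = 0 # Tracks total minimum cost
--     edges_used = 0 # Number of edges added to the MST
--
--     # This loop implements Kruskal’s Algorithm to build the Minimum Spanning Tree (MST)
--     for w, u, v in all_edges:
--         if union(parent, rank, u, v):
--             cost += w
--             edges_used += 1
--             if edges_used == n:
--                 break # Stop early once all villages are connected
--
--     return cost # Return the minimum reconstruction cost
-- ===== SOURCE B (Python) =====
-- def computeMinimumCost(weights, edges):
--     """Minimum cost to rebuild the water supply: Kruskal over the well-augmented
--     graph, with connectivity tracked by component labels (relabel on merge)
--     instead of a union-find forest."""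
--     n = len(weights) - 1
--     comp = list(range(n + 1))
--     all_edges = sorted([(w, u, v) for u, v, w in edges]
--                        + [(weights[i], 0, i) for i in range(1, n + 1) if weights[i] > 0])
--     cost = 0
--     merges = 0
--     for w, u, v in all_edges:
--         cu, cv = comp[u], comp[v]
--         if cu != cv:
--             comp = [cu if c == cv else c for c in comp]
--             cost += w
--             merges += 1
--             if merges == n:
--                 break
--     return cost
-- ===== Notes on version B (the rewrite author's own statement) =====
-- stated objective: simpler
-- what changed: Replaces the union-find forest (recursive find with path compression and union by rank) by a flat list of component labels that is relabelled on every accepted edge, keeping the same sorted-edge Kruskal scan.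
-- outside the precondition, e.g. on computeMinimumCost([0, 2, 3], [(5, 5, 9)]): A returns 5, B returns 5
import Mathlib
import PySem

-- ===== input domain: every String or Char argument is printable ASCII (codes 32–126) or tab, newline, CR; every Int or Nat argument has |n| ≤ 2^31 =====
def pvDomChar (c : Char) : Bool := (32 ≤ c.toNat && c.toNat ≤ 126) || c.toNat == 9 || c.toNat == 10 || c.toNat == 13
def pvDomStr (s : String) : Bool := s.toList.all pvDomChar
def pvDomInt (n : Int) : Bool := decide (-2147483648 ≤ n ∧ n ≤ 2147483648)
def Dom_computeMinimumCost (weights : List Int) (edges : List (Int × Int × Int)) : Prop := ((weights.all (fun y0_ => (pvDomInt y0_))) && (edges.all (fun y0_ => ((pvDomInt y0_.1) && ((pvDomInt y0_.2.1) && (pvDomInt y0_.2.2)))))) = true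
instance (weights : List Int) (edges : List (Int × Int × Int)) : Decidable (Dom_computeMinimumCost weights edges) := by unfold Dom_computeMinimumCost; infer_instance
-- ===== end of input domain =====

-- B replaces A's union-find (recursive find with path compression + union by rank) by plain
-- component labels relabelled on each merge: a simpler decomposition, same Kruskal cost.

-- ===== PORT A =====
-- find(parent, u): recursion bounded by a fuel argument (the list length at the call site);
-- on every input admitted by Pre_ the chain reaches a root well within that fuel, so the
-- fuel-0 fallback is never taken.
def pvFindA : Nat → List Int → Int → List Int × Int
  | 0, parent, u => (parent, PySem.List.pyGetD parent u 0)
  | fuel+1, parent, u =>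
    if PySem.List.pyGetD parent u 0 ≠ u then
      let pr := pvFindA fuel parent (PySem.List.pyGetD parent u 0)
      let parent' := PySem.List.pySetD pr.1 u pr.2
      (parent', PySem.List.pyGetD parent' u 0)
    else (parent, PySem.List.pyGetD parent u 0)

def pvUnionA (parent rank : List Int) (u v : Int) : List Int × List Int × Bool :=
  let f1 := pvFindA parent.length parent u
  let rootU := f1.2
  let f2 := pvFindA f1.1.length f1.1 v
  let rootV := f2.2
  let p2 := f2.1
  if rootU ≠ rootV then
    if PySem.List.pyGetD rank rootU 0 > PySem.List.pyGetD rank rootV 0 then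
      (PySem.List.pySetD p2 rootV rootU, rank, true)
    else if PySem.List.pyGetD rank rootU 0 < PySem.List.pyGetD rank rootV 0 then
      (PySem.List.pySetD p2 rootU rootV, rank, true)
    else
      (PySem.List.pySetD p2 rootV rootU, PySem.List.pySetD rank rootU (PySem.List.pyGetD rank rootU 0 + 1), true)
  else (p2, rank, false)

-- the Kruskal loop of A, with the 'edges_used == n' early break
def pvLoopA (n : Int) : List (Int × Int × Int) → List Int → List Int → Int → Int → Int
  | [], _, _, cost, _ => cost
  | (w, u, v) :: rest, parent, rank, cost, used =>
    let r := pvUnionA parent rank u v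
    if r.2.2 then
      if used + 1 = n then cost + w
      else pvLoopA n rest r.1 r.2.1 (cost + w) (used + 1)
    else pvLoopA n rest r.1 r.2.1 cost used

def computeMinimumCost (weights : List Int) (edges : List (Int × Int × Int)) : Int :=
  let n : Int := (weights.length : Int) - 1
  let parent := PySem.List.pyRange 0 (n + 1) 1
  let rank := List.replicate (n + 1).toNat (0 : Int)
  let well_edges := ((PySem.List.pyRange 1 (n + 1) 1).filter
      (fun i => decide (PySem.List.pyGetD weights i 0 > 0))).map
      (fun i => (PySem.List.pyGetD weights i 0, (0 : Int), i))
  let all_edges := edges.map (fun t => (t.2.2, t.1, t.2.1)) ++ well_edges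
  let sortedE := PySem.List.sorted all_edges (fun t => toLex (t.1, toLex (t.2.1, t.2.2))) false
  pvLoopA n sortedE parent rank 0 0

-- ===== PORT B =====
-- the label-merging scan of B, with the same 'merges == n' early break
def pvLoopB (n : Int) : List (Int × Int × Int) → List Int → Int → Int → Int
  | [], _, cost, _ => cost
  | (w, u, v) :: rest, comp, cost, merges =>
    let cu := PySem.List.pyGetD comp u 0
    let cv := PySem.List.pyGetD comp v 0
    if cu ≠ cv then
      if merges + 1 = n then cost + w
      else pvLoopB n rest (comp.map (fun c => if c = cv then cu else c)) (cost + w) (merges + 1)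
    else pvLoopB n rest comp cost merges

def computeMinimumCost_alt (weights : List Int) (edges : List (Int × Int × Int)) : Int :=
  let n : Int := (weights.length : Int) - 1
  let comp := PySem.List.pyRange 0 (n + 1) 1
  let all_edges := PySem.List.sorted
      (edges.map (fun t => (t.2.2, t.1, t.2.1)) ++
        ((PySem.List.pyRange 1 (n + 1) 1).filter
          (fun i => decide (PySem.List.pyGetD weights i 0 > 0))).map
          (fun i => (PySem.List.pyGetD weights i 0, (0 : Int), i)))
      (fun t => toLex (t.1, toLex (t.2.1, t.2.2))) false
  pvLoopB n all_edges comp 0 0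

-- ===== PRECONDITION & SPEC =====
-- Pre_ excludes the inputs on which A raises an IndexError: an edge endpoint u or v outside
-- Python's valid index range for the parent list of length len(weights) (not
-- -len(weights) ≤ u < len(weights)). This is slightly narrower than A's exact domain: if the
-- Kruskal loop breaks early (n edges used), a later out-of-range edge is never indexed and A
-- still returns; B scans the same sorted edges with the same break and returns the same value
-- there (see the cite in claim.json).
def Pre_computeMinimumCost (weights : List Int) (edges : List (Int × Int × Int)) : Prop :=
  ∀ e ∈ edges, PySem.Raise.InRange weights.length e.1 ∧ PySem.Raise.InRange weights.length e.2.1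

instance (weights : List Int) (edges : List (Int × Int × Int)) : Decidable (Pre_computeMinimumCost weights edges) := by
  unfold Pre_computeMinimumCost; infer_instance

def pvWitness_computeMinimumCost : List Int × (List (Int × Int × Int)) := ([0, 3, 2], [(1, 2, 1)])

def Spec_computeMinimumCost (weights : List Int) (edges : List (Int × Int × Int)) (out : Int) : Prop := out = computeMinimumCost_alt weights edges
instance (weights : List Int) (edges : List (Int × Int × Int)) (out : Int) : Decidable (Spec_computeMinimumCost weights edges out) := by unfold Spec_computeMinimumCost; infer_instance

-- ===== CLAIM (what is proved, stated in full; the proofs are below) =====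
def Claim_equal_computeMinimumCost : Prop := ∀ (weights : List Int) (edges : List (Int × Int × Int)), Dom_computeMinimumCost weights edges → Pre_computeMinimumCost weights edges → Spec_computeMinimumCost weights edges (computeMinimumCost weights edges)

-- ===== LEMMAS AND PROOFS =====
-- ---------- index bridges ----------
-- normalised (nonnegative) index of a valid Python index
def pvNrm (L : Nat) (u : Int) : Int := if u < 0 then u + L else u

def pvGetI (p : List Int) (u : Int) : Int := p.getD u.toNat 0

lemma pvNrm_nonneg {L : Nat} {u : Int} (h : PySem.Raise.InRange L u) :
    0 ≤ pvNrm L u ∧ pvNrm L u < L := by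
  obtain ⟨h1, h2⟩ := h
  unfold pvNrm; split <;> omega

lemma pvNrm_of_nonneg {L : Nat} {u : Int} (h : 0 ≤ u) : pvNrm L u = u := by
  unfold pvNrm; split <;> omega

lemma pvGet_nrm (p : List Int) (u : Int) (h : PySem.Raise.InRange p.length u) :
    PySem.List.pyGetD p u 0 = pvGetI p (pvNrm p.length u) := by
  obtain ⟨h1, h2⟩ := h
  by_cases hneg : u < 0
  · simp only [PySem.List.pyGetD, PySem.List.pyGet?, PySem.List.pyIdx?, pvNrm, pvGetI,
      if_neg (by omega : ¬ 0 ≤ u), if_pos h1, if_pos hneg, Option.bind_some,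
      List.getD_eq_getElem?_getD]
    congr 2
    omega
  · simp only [PySem.List.pyGetD, PySem.List.pyGet?, PySem.List.pyIdx?, pvNrm, pvGetI,
      if_pos (by omega : 0 ≤ u), if_pos h2, if_neg hneg, Option.bind_some,
      List.getD_eq_getElem?_getD]

lemma pvSet_nrm (p : List Int) (u : Int) (h : PySem.Raise.InRange p.length u) (v : Int) :
    PySem.List.pySetD p u v = p.set (pvNrm p.length u).toNat v := by
  obtain ⟨h1, h2⟩ := h
  by_cases hneg : u < 0
  · simp only [PySem.List.pySetD, PySem.List.pySet?, PySem.List.pyIdx?, pvNrm,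
      if_neg (by omega : ¬ 0 ≤ u), if_pos h1, if_pos hneg, Option.map_some, Option.getD_some]
    congr 1
    omega
  · simp only [PySem.List.pySetD, PySem.List.pySet?, PySem.List.pyIdx?, pvNrm,
      if_pos (by omega : 0 ≤ u), if_pos h2, if_neg hneg, Option.map_some, Option.getD_some]

-- ---------- union-find model ----------
def pvInR (p : List Int) (u : Int) : Prop := 0 ≤ u ∧ u < (p.length : Int)

def pvWf (p rk : List Int) : Prop :=
  rk.length = p.length ∧
  ∀ u : Int, pvInR p u →
    pvInR p (pvGetI p u) ∧ (pvGetI p u ≠ u → pvGetI rk u < pvGetI rk (pvGetI p u))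

def pvRootF : Nat → List Int → Int → Int
  | 0, _, u => u
  | f + 1, p, u => if p.getD u.toNat 0 = u then u else pvRootF f p (p.getD u.toNat 0)

def pvRoot (p : List Int) (u : Int) : Int := pvRootF p.length p u

def pvMsr (rk : List Int) (u : Int) : Nat :=
  ((Finset.range rk.length).filter (fun j => pvGetI rk u < rk.getD j 0)).card

lemma pvGetI_set {p : List Int} {u : Int} (v : Int) (hu : pvInR p u) (x : Int) (hx : 0 ≤ x) :
    pvGetI (p.set u.toNat v) x = if x = u then v else pvGetI p x := by
  unfold pvGetI
  rw [List.getD_eq_getElem?_getD, List.getD_eq_getElem?_getD, List.getElem?_set]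
  obtain ⟨hu0, hu1⟩ := hu
  by_cases hxu : x = u
  · subst hxu
    rw [if_pos rfl, if_pos (by omega)]
    simp
  · rw [if_neg (by omega), if_neg hxu]

lemma pvMsr_lt (rk : List Int) (u : Int) (h0 : 0 ≤ u) (h : u < (rk.length : Int)) :
    pvMsr rk u < rk.length := by
  unfold pvMsr
  have hmem : u.toNat ∈ Finset.range rk.length := by simp; omega
  have hnot : u.toNat ∉ (Finset.range rk.length).filter (fun j => pvGetI rk u < rk.getD j 0) := by
    simp [pvGetI]
  calc ((Finset.range rk.length).filter (fun j => pvGetI rk u < rk.getD j 0)).card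
      < (Finset.range rk.length).card := by
        apply Finset.card_lt_card
        rw [Finset.ssubset_iff_subset_ne]
        exact ⟨Finset.filter_subset _ _, fun hcon => hnot (by rw [hcon]; exact hmem)⟩
    _ = rk.length := Finset.card_range _

lemma pvMsr_step {p rk : List Int} (hwf : pvWf p rk) {u : Int} (hu : pvInR p u)
    (hne : pvGetI p u ≠ u) : pvMsr rk (pvGetI p u) < pvMsr rk u := by
  obtain ⟨hpu, hrk⟩ := hwf.2 u hu
  have hlt := hrk hne
  have hlen := hwf.1
  unfold pvMsr
  apply Finset.card_lt_card
  rw [Finset.ssubset_iff_subset_ne]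
  constructor
  · intro j hj
    simp only [Finset.mem_filter] at hj ⊢
    exact ⟨hj.1, lt_trans hlt hj.2⟩
  · intro hcon
    obtain ⟨hp1, hp2⟩ := hpu
    have hmem : (pvGetI p u).toNat ∈
        (Finset.range rk.length).filter (fun j => pvGetI rk u < rk.getD j 0) := by
      simp only [Finset.mem_filter, Finset.mem_range]
      refine ⟨by omega, ?_⟩
      have : pvGetI rk (pvGetI p u) = rk.getD (pvGetI p u).toNat 0 := rfl
      omega
    rw [← hcon] at hmem
    simp only [Finset.mem_filter] at hmem
    have : pvGetI rk (pvGetI p u) = rk.getD (pvGetI p u).toNat 0 := rfl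
    omega

lemma pvRootF_spec {p rk : List Int} (hwf : pvWf p rk) :
    ∀ m : Nat, ∀ u : Int, pvInR p u → pvMsr rk u ≤ m →
      ∀ f g : Nat, pvMsr rk u < f → pvMsr rk u < g →
        pvRootF f p u = pvRootF g p u ∧ pvGetI p (pvRootF f p u) = pvRootF f p u ∧
        pvInR p (pvRootF f p u) := by
  intro m
  induction m with
  | zero =>
    intro u hu hm f g hf hg
    obtain ⟨f', rfl⟩ : ∃ f', f = f' + 1 := ⟨f - 1, by omega⟩
    obtain ⟨g', rfl⟩ : ∃ g', g = g' + 1 := ⟨g - 1, by omega⟩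
    by_cases hroot : p.getD u.toNat 0 = u
    · have he : pvRootF (f' + 1) p u = u := by
        simp only [pvRootF]; rw [if_pos hroot]
      have hg : pvRootF (g' + 1) p u = u := by
        simp only [pvRootF]; rw [if_pos hroot]
      rw [he, hg]
      exact ⟨rfl, hroot, hu⟩
    · exfalso
      have := pvMsr_step hwf hu hroot
      omega
  | succ m ih =>
    intro u hu hm f g hf hg
    obtain ⟨f', rfl⟩ : ∃ f', f = f' + 1 := ⟨f - 1, by omega⟩
    obtain ⟨g', rfl⟩ : ∃ g', g = g' + 1 := ⟨g - 1, by omega⟩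
    by_cases hroot : p.getD u.toNat 0 = u
    · have he : pvRootF (f' + 1) p u = u := by
        simp only [pvRootF]; rw [if_pos hroot]
      have hg : pvRootF (g' + 1) p u = u := by
        simp only [pvRootF]; rw [if_pos hroot]
      rw [he, hg]
      exact ⟨rfl, hroot, hu⟩
    · have hpu := (hwf.2 u hu).1
      have hstep := pvMsr_step hwf hu hroot
      have h3 := ih (pvGetI p u) hpu (by omega) f' g' (by omega) (by omega)
      have he : pvRootF (f' + 1) p u = pvRootF f' p (p.getD u.toNat 0) := by
        simp only [pvRootF]; rw [if_neg hroot]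
      have hg : pvRootF (g' + 1) p u = pvRootF g' p (p.getD u.toNat 0) := by
        simp only [pvRootF]; rw [if_neg hroot]
      rw [he, hg]
      exact h3

lemma pvMsr_lt_len {p rk : List Int} (hwf : pvWf p rk) {u : Int} (hu : pvInR p u) :
    pvMsr rk u < p.length := by
  have h := pvMsr_lt rk u hu.1 (by rw [hwf.1]; exact hu.2)
  have h1 := hwf.1
  omega

lemma pvRootF_eq_root {p rk : List Int} (hwf : pvWf p rk) {u : Int} (hu : pvInR p u)
    {f : Nat} (hf : pvMsr rk u < f) : pvRootF f p u = pvRoot p u := by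
  exact (pvRootF_spec hwf (pvMsr rk u) u hu le_rfl f p.length hf (pvMsr_lt_len hwf hu)).1

lemma pvRoot_fix {p rk : List Int} (hwf : pvWf p rk) {u : Int} (hu : pvInR p u) :
    pvGetI p (pvRoot p u) = pvRoot p u ∧ pvInR p (pvRoot p u) := by
  have h := pvRootF_spec hwf (pvMsr rk u) u hu le_rfl p.length p.length
    (pvMsr_lt_len hwf hu) (pvMsr_lt_len hwf hu)
  exact ⟨h.2.1, h.2.2⟩

lemma pvRoot_of_fix {p : List Int} {r : Int} (hfix : pvGetI p r = r) (hL : 1 ≤ p.length) :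
    pvRoot p r = r := by
  obtain ⟨L, hL2⟩ : ∃ L, p.length = L + 1 := ⟨p.length - 1, by omega⟩
  unfold pvRoot
  rw [hL2]
  unfold pvGetI at hfix
  simp only [pvRootF]
  rw [if_pos hfix]

lemma pvRoot_step {p rk : List Int} (hwf : pvWf p rk) {u : Int} (hu : pvInR p u)
    (hne : pvGetI p u ≠ u) : pvRoot p u = pvRoot p (pvGetI p u) := by
  have hpu := (hwf.2 u hu).1
  have hstep := pvMsr_step hwf hu hne
  rw [← pvRootF_eq_root hwf hu (f := pvMsr rk u + 1) (by omega)]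
  have h1 : pvRootF (pvMsr rk u + 1) p u = pvRootF (pvMsr rk u) p (pvGetI p u) := by
    unfold pvGetI at hne ⊢
    simp only [pvRootF]
    rw [if_neg hne]
  rw [h1]
  exact pvRootF_eq_root hwf hpu hstep

lemma pvRank_lt_root {p rk : List Int} (hwf : pvWf p rk) :
    ∀ m : Nat, ∀ u : Int, pvInR p u → pvMsr rk u ≤ m → pvRoot p u ≠ u →
      pvGetI rk u < pvGetI rk (pvRoot p u) := by
  intro m
  induction m with
  | zero =>
    intro u hu hm hne
    by_cases hroot : pvGetI p u = u
    · exact absurd (pvRoot_of_fix hroot (by obtain ⟨a, b⟩ := hu; omega)) hne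
    · exact absurd (pvMsr_step hwf hu hroot) (by omega)
  | succ m ih =>
    intro u hu hm hne
    by_cases hroot : pvGetI p u = u
    · exact absurd (pvRoot_of_fix hroot (by obtain ⟨a, b⟩ := hu; omega)) hne
    · obtain ⟨hpu, hrk⟩ := hwf.2 u hu
      have hlt := hrk hroot
      have hstep := pvMsr_step hwf hu hroot
      have hr := pvRoot_step hwf hu hroot
      by_cases hpuroot : pvRoot p (pvGetI p u) = pvGetI p u
      · rw [hr, hpuroot]; exact hlt
      · have := ih (pvGetI p u) hpu (by omega) hpuroot
        rw [hr]; omega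

-- setting a valid entry to (a root of its own class) keeps wf and all roots
lemma pvRedirect {p rk : List Int} (hwf : pvWf p rk) {u : Int} (hu : pvInR p u) :
    pvWf (p.set u.toNat (pvRoot p u)) rk ∧
    ∀ v : Int, pvInR p v → pvRoot (p.set u.toNat (pvRoot p u)) v = pvRoot p v := by
  have hL : 1 ≤ p.length := by obtain ⟨a, b⟩ := hu; omega
  obtain ⟨hfix, hrin⟩ := pvRoot_fix hwf hu
  set r := pvRoot p u with hr
  set p' := p.set u.toNat r with hp'
  have hlen : p'.length = p.length := by simp [hp']
  have hget : ∀ x : Int, 0 ≤ x → pvGetI p' x = if x = u then r else pvGetI p x :=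
    fun x hx => pvGetI_set r hu x hx
  have hinr : ∀ x : Int, pvInR p' x ↔ pvInR p x := by intro x; simp [pvInR, hlen]
  have hwf' : pvWf p' rk := by
    refine ⟨by rw [hlen]; exact hwf.1, ?_⟩
    intro x hx
    rw [hinr] at hx
    rw [hget x hx.1]
    by_cases hxu : x = u
    · rw [if_pos hxu]
      refine ⟨(hinr r).mpr hrin, ?_⟩
      intro hne
      subst hxu
      exact pvRank_lt_root hwf (pvMsr rk x) x hx le_rfl hne
    · rw [if_neg hxu]
      obtain ⟨h1, h2⟩ := hwf.2 x hx
      exact ⟨(hinr _).mpr h1, h2⟩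
  refine ⟨hwf', ?_⟩
  have main : ∀ m : Nat, ∀ v : Int, pvInR p v → pvMsr rk v ≤ m → pvRoot p' v = pvRoot p v := by
    intro m
    induction m with
    | zero =>
      intro v hv hm
      by_cases hfx : pvGetI p' v = v
      · have h1 : pvRoot p' v = v := pvRoot_of_fix hfx (by omega)
        have h2 : pvGetI p v = v := by
          rcases eq_or_ne v u with rfl | hne
          · have hru : r = v := by rw [hget v hv.1, if_pos rfl] at hfx; exact hfx
            rw [← hru]; exact hfix
          · rw [hget v hv.1, if_neg hne] at hfx; exact hfx
        rw [h1, pvRoot_of_fix h2 hL]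
      · exfalso
        have hvin' : pvInR p' v := (hinr v).mpr hv
        have hms := pvMsr_step hwf' hvin' hfx
        omega
    | succ m ih =>
      intro v hv hm
      by_cases hfx : pvGetI p' v = v
      · have h1 : pvRoot p' v = v := pvRoot_of_fix hfx (by omega)
        have h2 : pvGetI p v = v := by
          rcases eq_or_ne v u with rfl | hne
          · have hru : r = v := by rw [hget v hv.1, if_pos rfl] at hfx; exact hfx
            rw [← hru]; exact hfix
          · rw [hget v hv.1, if_neg hne] at hfx; exact hfx
        rw [h1, pvRoot_of_fix h2 hL]
      · have hvin' : pvInR p' v := (hinr v).mpr hv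
        have hstep := pvRoot_step hwf' hvin' hfx
        have hw_in : pvInR p (pvGetI p' v) := (hinr _).mp (hwf'.2 v hvin').1
        have hms : pvMsr rk (pvGetI p' v) < pvMsr rk v := pvMsr_step hwf' hvin' hfx
        rcases eq_or_ne v u with rfl | hne
        · have hgu : pvGetI p' v = r := by rw [hget v hv.1, if_pos rfl]
          rw [hstep, hgu]
          rw [hgu] at hms hw_in
          rw [ih r hw_in (by omega), pvRoot_of_fix hfix hL]
        · have hgv : pvGetI p' v = pvGetI p v := by rw [hget v hv.1, if_neg hne]
          have hpne : pvGetI p v ≠ v := by rw [← hgv]; exact hfx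
          rw [hgv] at hms hw_in
          rw [hstep, hgv, ih (pvGetI p v) hw_in (by omega), ← pvRoot_step hwf hv hpne]
  intro v hv
  exact main (pvMsr rk v) v hv le_rfl

-- attaching root a under root b (with the rank situation of union by rank)
lemma pvAttach {p rk rk' : List Int} (hwf : pvWf p rk) {a b : Int}
    (ha : pvInR p a) (hb : pvInR p b)
    (hra : pvGetI p a = a) (hrb : pvGetI p b = b) (hab : a ≠ b)
    (hrklen : rk'.length = rk.length)
    (hmono : ∀ x : Int, pvInR p x → pvGetI rk x ≤ pvGetI rk' x)
    (hother : ∀ x : Int, pvInR p x → x ≠ b → pvGetI rk' x = pvGetI rk x)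
    (hlt : pvGetI rk' a < pvGetI rk' b) :
    pvWf (p.set a.toNat b) rk' ∧
    ∀ x : Int, pvInR p x →
      pvRoot (p.set a.toNat b) x = if pvRoot p x = a then b else pvRoot p x := by
  have hL : 1 ≤ p.length := by obtain ⟨x, y⟩ := ha; omega
  set p' := p.set a.toNat b with hp'
  have hlen : p'.length = p.length := by simp [hp']
  have hget : ∀ x : Int, 0 ≤ x → pvGetI p' x = if x = a then b else pvGetI p x :=
    fun x hx => pvGetI_set b ha x hx
  have hinr : ∀ x : Int, pvInR p' x ↔ pvInR p x := by intro x; simp [pvInR, hlen]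
  have hba : b ≠ a := fun h => hab h.symm
  have hwf' : pvWf p' rk' := by
    refine ⟨by rw [hrklen, hwf.1, ← hlen], ?_⟩
    intro x hx
    rw [hinr] at hx
    rw [hget x hx.1]
    by_cases hxa : x = a
    · rw [if_pos hxa]
      exact ⟨(hinr b).mpr hb, fun _ => hxa ▸ hlt⟩
    · rw [if_neg hxa]
      obtain ⟨h1, h2⟩ := hwf.2 x hx
      refine ⟨(hinr _).mpr h1, ?_⟩
      intro hne
      rcases eq_or_ne x b with rfl | hxb
      · exact absurd hrb hne
      · rw [hother x hx hxb]
        calc pvGetI rk x < pvGetI rk (pvGetI p x) := h2 hne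
          _ ≤ pvGetI rk' (pvGetI p x) := hmono _ h1
  refine ⟨hwf', ?_⟩
  have main : ∀ m : Nat, ∀ x : Int, pvInR p x → pvMsr rk' x ≤ m →
      pvRoot p' x = if pvRoot p x = a then b else pvRoot p x := by
    intro m
    induction m with
    | zero =>
      intro x hx hm
      by_cases hfx : pvGetI p' x = x
      · have hxa : x ≠ a := by
          intro h
          rw [hget x hx.1, if_pos h] at hfx
          exact hba (hfx.trans h)
        have h2 : pvGetI p x = x := by rw [hget x hx.1, if_neg hxa] at hfx; exact hfx
        have h3 : pvRoot p x = x := pvRoot_of_fix h2 hL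
        rw [pvRoot_of_fix hfx (by omega), h3, if_neg hxa]
      · exfalso
        have := pvMsr_step hwf' ((hinr x).mpr hx) hfx
        omega
    | succ m ih =>
      intro x hx hm
      by_cases hfx : pvGetI p' x = x
      · have hxa : x ≠ a := by
          intro h
          rw [hget x hx.1, if_pos h] at hfx
          exact hba (hfx.trans h)
        have h2 : pvGetI p x = x := by rw [hget x hx.1, if_neg hxa] at hfx; exact hfx
        have h3 : pvRoot p x = x := pvRoot_of_fix h2 hL
        rw [pvRoot_of_fix hfx (by omega), h3, if_neg hxa]
      · have hxin' : pvInR p' x := (hinr x).mpr hx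
        have hstep := pvRoot_step hwf' hxin' hfx
        have hw_in : pvInR p (pvGetI p' x) := (hinr _).mp (hwf'.2 x hxin').1
        have hms : pvMsr rk' (pvGetI p' x) < pvMsr rk' x := pvMsr_step hwf' hxin' hfx
        rcases eq_or_ne x a with rfl | hne
        · have hgu : pvGetI p' x = b := by rw [hget x hx.1, if_pos rfl]
          rw [hgu] at hms hw_in hstep
          rw [hstep, ih b hw_in (by omega), pvRoot_of_fix hrb hL, if_neg hba,
            pvRoot_of_fix hra hL, if_pos rfl]
        · have hgv : pvGetI p' x = pvGetI p x := by rw [hget x hx.1, if_neg hne]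
          have hpne : pvGetI p x ≠ x := by rw [← hgv]; exact hfx
          rw [hgv] at hms hw_in hstep
          rw [hstep, ih (pvGetI p x) hw_in (by omega), ← pvRoot_step hwf hx hpne]
  intro x hx
  exact main (pvMsr rk' x) x hx le_rfl



-- ---------- find / union / loop ----------
lemma pvGetI_map (f : Int → Int) (l : List Int) (x : Int) (hx : 0 ≤ x)
    (hlt : x < (l.length : Int)) : pvGetI (l.map f) x = f (pvGetI l x) := by
  unfold pvGetI
  have h1 : x.toNat < l.length := by omega
  simp [List.getD_eq_getElem?_getD, List.getElem?_map, List.getElem?_eq_getElem h1]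

lemma pvMergeIff (r1 r2 a b : Int) (_hab : a ≠ b) :
    (if r1 = a then b else r1) = (if r2 = a then b else r2) ↔
      (r1 = r2 ∨ ((r1 = a ∨ r1 = b) ∧ (r2 = a ∨ r2 = b))) := by
  split_ifs <;> omega

lemma pvFind_spec {p rk : List Int} (hwf : pvWf p rk) :
    ∀ f : Nat, ∀ u : Int, pvInR p u → pvMsr rk u < f →
      (pvFindA f p u).2 = pvRoot p u ∧
      (pvFindA f p u).1.length = p.length ∧
      pvWf (pvFindA f p u).1 rk ∧
      (∀ v : Int, pvInR p v → pvRoot (pvFindA f p u).1 v = pvRoot p v) := by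
  intro f
  induction f with
  | zero => intro u hu hf; omega
  | succ f ih =>
    intro u hu hf
    have hL : 1 ≤ p.length := by obtain ⟨a, b⟩ := hu; omega
    have hIR : PySem.Raise.InRange p.length u := ⟨by obtain ⟨a, b⟩ := hu; omega, hu.2⟩
    have hg : PySem.List.pyGetD p u 0 = pvGetI p u := by
      rw [pvGet_nrm p u hIR, pvNrm_of_nonneg hu.1]
    by_cases hroot : pvGetI p u = u
    · have hred : pvFindA (f + 1) p u = (p, pvGetI p u) := by
        simp only [pvFindA, hg]
        rw [if_neg (not_ne_iff.mpr hroot)]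
      rw [hred, hroot]
      exact ⟨(pvRoot_of_fix hroot hL).symm, rfl, hwf, fun v _ => rfl⟩
    · have hpu := (hwf.2 u hu).1
      have hms := pvMsr_step hwf hu hroot
      obtain ⟨h2, hlen1, hwf1, hpres⟩ := ih (pvGetI p u) hpu (by omega)
      have hred : pvFindA (f + 1) p u =
          (PySem.List.pySetD (pvFindA f p (pvGetI p u)).1 u (pvFindA f p (pvGetI p u)).2,
           PySem.List.pyGetD
             (PySem.List.pySetD (pvFindA f p (pvGetI p u)).1 u (pvFindA f p (pvGetI p u)).2) u 0) := by
        simp only [pvFindA, hg]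
        rw [if_pos hroot]
      set p1 := (pvFindA f p (pvGetI p u)).1 with hp1
      have hu1 : pvInR p1 u := by
        obtain ⟨a, b⟩ := hu
        exact ⟨a, by rw [hlen1]; exact b⟩
      have hr2 : (pvFindA f p (pvGetI p u)).2 = pvRoot p1 u := by
        rw [h2, hpres u hu, ← pvRoot_step hwf hu hroot]
      have hset : PySem.List.pySetD p1 u (pvFindA f p (pvGetI p u)).2 =
          p1.set u.toNat (pvRoot p1 u) := by
        rw [PySem.List.pySetD_of_nonneg p1 ((pvFindA f p (pvGetI p u)).2) hu.1, hr2]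
      obtain ⟨hwf2, hpres2⟩ := pvRedirect hwf1 hu1
      have hlen2 : (p1.set u.toNat (pvRoot p1 u)).length = p.length := by
        rw [List.length_set, hlen1]
      have hval : PySem.List.pyGetD (p1.set u.toNat (pvRoot p1 u)) u 0 = pvRoot p u := by
        rw [pvGet_nrm _ u ⟨by rw [hlen2]; exact hIR.1, by rw [hlen2]; exact hIR.2⟩,
          pvNrm_of_nonneg hu.1, pvGetI_set _ hu1 u hu.1, if_pos rfl, hpres u hu]
      rw [hred, hset]
      refine ⟨hval, hlen2, hwf2, ?_⟩
      intro v hv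
      have hv1 : pvInR p1 v := ⟨hv.1, by rw [hlen1]; exact hv.2⟩
      rw [hpres2 v hv1, hpres v hv]

lemma pvFind_spec_neg {p rk : List Int} (hwf : pvWf p rk) {u : Int}
    (hIR : PySem.Raise.InRange p.length u) (hneg : u < 0) :
    (pvFindA p.length p u).2 = pvRoot p (pvNrm p.length u) ∧
    (pvFindA p.length p u).1.length = p.length ∧
    pvWf (pvFindA p.length p u).1 rk ∧
    (∀ v : Int, pvInR p v → pvRoot (pvFindA p.length p u).1 v = pvRoot p v) := by
  obtain ⟨hn0, hn1⟩ := pvNrm_nonneg hIR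
  set w := pvNrm p.length u with hw
  have hwin : pvInR p w := ⟨hn0, hn1⟩
  have hL : 1 ≤ p.length := by omega
  obtain ⟨f', hf'⟩ : ∃ f', p.length = f' + 1 := ⟨p.length - 1, by omega⟩
  have hg : PySem.List.pyGetD p u 0 = pvGetI p w := pvGet_nrm p u hIR
  have hpw0 : 0 ≤ pvGetI p w := ((hwf.2 w hwin).1).1
  have hcond : pvGetI p w ≠ u := by omega
  have hred : pvFindA p.length p u =
      (PySem.List.pySetD (pvFindA f' p (pvGetI p w)).1 u (pvFindA f' p (pvGetI p w)).2,
       PySem.List.pyGetD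
         (PySem.List.pySetD (pvFindA f' p (pvGetI p w)).1 u (pvFindA f' p (pvGetI p w)).2) u 0) := by
    rw [hf']
    simp only [pvFindA, hg]
    rw [if_pos hcond]
  have hrec : (pvFindA f' p (pvGetI p w)).2 = pvRoot p (pvGetI p w) ∧
      (pvFindA f' p (pvGetI p w)).1.length = p.length ∧
      pvWf (pvFindA f' p (pvGetI p w)).1 rk ∧
      (∀ v : Int, pvInR p v → pvRoot (pvFindA f' p (pvGetI p w)).1 v = pvRoot p v) := by
    by_cases hroot : pvGetI p w = w
    · have hend : pvFindA f' p (pvGetI p w) = (p, pvGetI p w) := by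
        match f' with
        | 0 =>
          simp only [pvFindA]
          rw [pvGet_nrm p (pvGetI p w) ⟨by rw [hroot]; omega, by rw [hroot]; omega⟩,
            pvNrm_of_nonneg hpw0, hroot, hroot]
        | k + 1 =>
          simp only [pvFindA]
          rw [pvGet_nrm p (pvGetI p w) ⟨by rw [hroot]; omega, by rw [hroot]; omega⟩,
            pvNrm_of_nonneg hpw0, hroot]
          rw [if_neg (not_ne_iff.mpr hroot), hroot]
      rw [hend, hroot]
      exact ⟨(pvRoot_of_fix hroot hL).symm, rfl, hwf, fun v _ => rfl⟩
    · have hpu := (hwf.2 w hwin).1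
      have hms := pvMsr_step hwf hwin hroot
      have hmsw : pvMsr rk w < p.length := pvMsr_lt_len hwf hwin
      exact pvFind_spec hwf f' (pvGetI p w) hpu (by omega)
  obtain ⟨h2, hlen1, hwf1, hpres⟩ := hrec
  set p1 := (pvFindA f' p (pvGetI p w)).1 with hp1
  have hwin1 : pvInR p1 w := ⟨hn0, by rw [hlen1]; exact hn1⟩
  have hr2 : (pvFindA f' p (pvGetI p w)).2 = pvRoot p1 w := by
    by_cases hroot : pvGetI p w = w
    · rw [h2, hroot, hpres w hwin]
    · rw [h2, hpres w hwin, ← pvRoot_step hwf hwin hroot]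
  have hset : PySem.List.pySetD p1 u (pvFindA f' p (pvGetI p w)).2 =
      p1.set w.toNat (pvRoot p1 w) := by
    rw [pvSet_nrm p1 u ⟨by rw [hlen1]; exact hIR.1, by rw [hlen1]; exact hIR.2⟩, hr2]
    congr 1
    rw [hw]
    unfold pvNrm
    rw [hlen1]
  obtain ⟨hwf2, hpres2⟩ := pvRedirect hwf1 hwin1
  have hlen2 : (p1.set w.toNat (pvRoot p1 w)).length = p.length := by
    rw [List.length_set, hlen1]
  have hval : PySem.List.pyGetD (p1.set w.toNat (pvRoot p1 w)) u 0 = pvRoot p w := by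
    have hIR2 : PySem.Raise.InRange (p1.set w.toNat (pvRoot p1 w)).length u := by
      rw [hlen2]; exact hIR
    rw [pvGet_nrm _ u hIR2]
    have hnrm : pvNrm (p1.set w.toNat (pvRoot p1 w)).length u = w := by
      rw [hlen2, hw]
    rw [hnrm, pvGetI_set _ hwin1 w hn0, if_pos rfl, hpres w hwin]
  rw [hred, hset]
  refine ⟨hval, hlen2, hwf2, ?_⟩
  intro v hv
  have hv1 : pvInR p1 v := ⟨hv.1, by rw [hlen1]; exact hv.2⟩
  rw [hpres2 v hv1, hpres v hv]

lemma pvFind_spec_any {p rk : List Int} (hwf : pvWf p rk)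
    {u : Int} (hIR : PySem.Raise.InRange p.length u) :
    (pvFindA p.length p u).2 = pvRoot p (pvNrm p.length u) ∧
    (pvFindA p.length p u).1.length = p.length ∧
    pvWf (pvFindA p.length p u).1 rk ∧
    (∀ v : Int, pvInR p v → pvRoot (pvFindA p.length p u).1 v = pvRoot p v) := by
  by_cases hneg : u < 0
  · exact pvFind_spec_neg hwf hIR hneg
  · have hu : pvInR p u := ⟨by omega, hIR.2⟩
    have := pvFind_spec hwf p.length u hu (pvMsr_lt_len hwf hu)
    rw [pvNrm_of_nonneg hu.1]
    exact this


lemma pvUnion_spec {p rk : List Int} (hwf : pvWf p rk) {u v : Int}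
    (hu : PySem.Raise.InRange p.length u) (hv : PySem.Raise.InRange p.length v) :
    (pvUnionA p rk u v).1.length = p.length ∧
    pvWf (pvUnionA p rk u v).1 (pvUnionA p rk u v).2.1 ∧
    ((pvUnionA p rk u v).2.2 = true ↔
      pvRoot p (pvNrm p.length u) ≠ pvRoot p (pvNrm p.length v)) ∧
    ∀ x y : Int, pvInR p x → pvInR p y →
      (pvRoot (pvUnionA p rk u v).1 x = pvRoot (pvUnionA p rk u v).1 y ↔
        (pvRoot p x = pvRoot p y ∨
          ((pvRoot p x = pvRoot p (pvNrm p.length u) ∨ pvRoot p x = pvRoot p (pvNrm p.length v)) ∧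
           (pvRoot p y = pvRoot p (pvNrm p.length u) ∨ pvRoot p y = pvRoot p (pvNrm p.length v))))) := by
  obtain ⟨hnu0, hnu1⟩ := pvNrm_nonneg hu
  obtain ⟨hnv0, hnv1⟩ := pvNrm_nonneg hv
  have hnuI : pvInR p (pvNrm p.length u) := ⟨hnu0, hnu1⟩
  have hnvI : pvInR p (pvNrm p.length v) := ⟨hnv0, hnv1⟩
  obtain ⟨e1, l1, w1, pr1⟩ := pvFind_spec_any hwf hu
  have hv1 : PySem.Raise.InRange (pvFindA p.length p u).1.length v := by rw [l1]; exact hv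
  obtain ⟨e2, l2, w2, pr2⟩ := pvFind_spec_any w1 hv1
  set rU := pvRoot p (pvNrm p.length u) with hrU
  set rV := pvRoot p (pvNrm p.length v) with hrV
  set F1 := pvFindA p.length p u with hF1
  set F2 := pvFindA F1.1.length F1.1 v with hF2
  have hnv' : pvNrm F1.1.length v = pvNrm p.length v := by rw [l1]
  have e2' : F2.2 = rV := by
    rw [e2, hnv', pr1 (pvNrm p.length v) hnvI]
  have l2' : F2.1.length = p.length := by rw [l2, l1]
  have prP : ∀ x : Int, pvInR p x → pvRoot F2.1 x = pvRoot p x := by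
    intro x hx
    rw [pr2 x ⟨hx.1, by rw [l1]; exact hx.2⟩, pr1 x hx]
  obtain ⟨hfixU, hUin⟩ := pvRoot_fix hwf hnuI
  obtain ⟨hfixV, hVin⟩ := pvRoot_fix hwf hnvI
  rw [← hrU] at hfixU hUin
  rw [← hrV] at hfixV hVin
  obtain ⟨hU0, hU1⟩ := hUin
  obtain ⟨hV0, hV1⟩ := hVin
  have hL : 1 ≤ p.length := by obtain ⟨a, b⟩ := hnuI; omega
  have hUin : pvInR p rU := ⟨hU0, hU1⟩
  have hVin : pvInR p rV := ⟨hV0, hV1⟩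
  have hUin2 : pvInR F2.1 rU := ⟨hU0, by rw [l2']; exact hU1⟩
  have hVin2 : pvInR F2.1 rV := ⟨hV0, by rw [l2']; exact hV1⟩
  -- roots of p are also roots (fixpoints) of F2.1
  have hrootU2 : pvRoot F2.1 rU = rU := by rw [prP rU hUin, pvRoot_of_fix hfixU hL]
  have hrootV2 : pvRoot F2.1 rV = rV := by rw [prP rV hVin, pvRoot_of_fix hfixV hL]
  have hfixU2 : pvGetI F2.1 rU = rU := by
    have h1 := (pvRoot_fix w2 hUin2).1
    rw [hrootU2] at h1
    exact h1
  have hfixV2 : pvGetI F2.1 rV = rV := by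
    have h1 := (pvRoot_fix w2 hVin2).1
    rw [hrootV2] at h1
    exact h1
  have hrkl : rk.length = p.length := hwf.1
  have hgrU : PySem.List.pyGetD rk rU 0 = pvGetI rk rU := by
    rw [pvGet_nrm rk rU ⟨by omega, by omega⟩, pvNrm_of_nonneg hU0]
  have hgrV : PySem.List.pyGetD rk rV 0 = pvGetI rk rV := by
    rw [pvGet_nrm rk rV ⟨by omega, by omega⟩, pvNrm_of_nonneg hV0]
  by_cases hflag : rU = rV
  · -- roots already equal: else-branch, nothing merged
    have hUn : pvUnionA p rk u v = (F2.1, rk, false) := by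
      simp only [pvUnionA, ← hF1, ← hF2]
      rw [e1, e2', if_neg (not_ne_iff.mpr hflag)]
    rw [hUn]
    refine ⟨l2', w2, by simp [hflag], ?_⟩
    intro x y hx hy
    rw [prP x hx, prP y hy]
    constructor
    · exact fun h => Or.inl h
    · rintro (h | ⟨h1, h2⟩)
      · exact h
      · rw [← hflag] at h1 h2
        rcases h1 with h1 | h1 <;> rcases h2 with h2 | h2 <;> omega
  · -- distinct roots: one of the three attach branches runs
    have hmain : ∀ a b : Int, ∀ rk' : List Int,
        (a = rU ∧ b = rV ∨ a = rV ∧ b = rU) →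
        rk'.length = rk.length →
        (∀ x : Int, pvInR F2.1 x → pvGetI rk x ≤ pvGetI rk' x) →
        (∀ x : Int, pvInR F2.1 x → x ≠ b → pvGetI rk' x = pvGetI rk x) →
        pvGetI rk' a < pvGetI rk' b →
        (F2.1.set a.toNat b).length = p.length ∧
        pvWf (F2.1.set a.toNat b) rk' ∧
        (true = true ↔ rU ≠ rV) ∧
        (∀ x y : Int, pvInR p x → pvInR p y →
          (pvRoot (F2.1.set a.toNat b) x = pvRoot (F2.1.set a.toNat b) y ↔
            (pvRoot p x = pvRoot p y ∨
              ((pvRoot p x = rU ∨ pvRoot p x = rV) ∧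
               (pvRoot p y = rU ∨ pvRoot p y = rV))))) := by
      intro a b rk' hcase hrkl' hmono hother hlt
      have hab : a ≠ b := by rcases hcase with ⟨rfl, rfl⟩ | ⟨rfl, rfl⟩ <;> omega
      have haI : pvInR F2.1 a := by rcases hcase with ⟨rfl, _⟩ | ⟨rfl, _⟩ <;> assumption
      have hbI : pvInR F2.1 b := by rcases hcase with ⟨_, rfl⟩ | ⟨_, rfl⟩ <;> assumption
      have hfa : pvGetI F2.1 a = a := by rcases hcase with ⟨rfl, _⟩ | ⟨rfl, _⟩ <;> assumption
      have hfb : pvGetI F2.1 b = b := by rcases hcase with ⟨_, rfl⟩ | ⟨_, rfl⟩ <;> assumption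
      obtain ⟨hwf', hroots⟩ := pvAttach w2 haI hbI hfa hfb hab hrkl' hmono hother hlt
      refine ⟨by rw [List.length_set, l2'], hwf', by simp [hflag], ?_⟩
      intro x y hx hy
      have hx2 : pvInR F2.1 x := ⟨hx.1, by rw [l2']; exact hx.2⟩
      have hy2 : pvInR F2.1 y := ⟨hy.1, by rw [l2']; exact hy.2⟩
      rw [hroots x hx2, hroots y hy2, prP x hx, prP y hy,
        pvMergeIff (pvRoot p x) (pvRoot p y) a b hab]
      rcases hcase with ⟨rfl, rfl⟩ | ⟨rfl, rfl⟩
      · exact Iff.rfl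
      · constructor
        · rintro (h | ⟨h1, h2⟩)
          · exact Or.inl h
          · exact Or.inr ⟨h1.symm, h2.symm⟩
        · rintro (h | ⟨h1, h2⟩)
          · exact Or.inl h
          · exact Or.inr ⟨h1.symm, h2.symm⟩
    by_cases hc1 : pvGetI rk rU > pvGetI rk rV
    · have hUn : pvUnionA p rk u v = (F2.1.set rV.toNat rU, rk, true) := by
        simp only [pvUnionA, ← hF1, ← hF2]
        rw [e1, e2', if_pos hflag, hgrU, hgrV, if_pos hc1,
          PySem.List.pySetD_of_nonneg _ _ hVin.1]
      rw [hUn]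
      exact hmain rV rU rk (Or.inr ⟨rfl, rfl⟩) rfl (fun x _ => le_rfl)
        (fun x _ _ => rfl) hc1
    · by_cases hc2 : pvGetI rk rU < pvGetI rk rV
      · have hUn : pvUnionA p rk u v = (F2.1.set rU.toNat rV, rk, true) := by
          simp only [pvUnionA, ← hF1, ← hF2]
          rw [e1, e2', if_pos hflag, hgrU, hgrV, if_neg (by omega), if_pos hc2,
            PySem.List.pySetD_of_nonneg _ _ hUin.1]
        rw [hUn]
        exact hmain rU rV rk (Or.inl ⟨rfl, rfl⟩) rfl (fun x _ => le_rfl)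
          (fun x _ _ => rfl) hc2
      · have hrkU : pvInR rk rU := ⟨hUin.1, by omega⟩
        have hUn : pvUnionA p rk u v =
            (F2.1.set rV.toNat rU, rk.set rU.toNat (pvGetI rk rU + 1), true) := by
          simp only [pvUnionA, ← hF1, ← hF2]
          rw [e1, e2', if_pos hflag, hgrU, hgrV, if_neg (by omega), if_neg (by omega),
            PySem.List.pySetD_of_nonneg _ _ hVin.1, PySem.List.pySetD_of_nonneg _ _ hUin.1]
        rw [hUn]
        refine hmain rV rU (rk.set rU.toNat (pvGetI rk rU + 1)) (Or.inr ⟨rfl, rfl⟩)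
          (List.length_set ..) ?_ ?_ ?_
        · intro x hx
          rw [pvGetI_set _ hrkU x hx.1]
          split_ifs with h
          · rw [h]; omega
          · exact le_rfl
        · intro x hx hxb
          rw [pvGetI_set _ hrkU x hx.1, if_neg hxb]
        · rw [pvGetI_set _ hrkU rV hVin.1, if_neg (by omega),
            pvGetI_set _ hrkU rU hUin.1, if_pos rfl]
          omega


-- partition correspondence between A's forest and B's labels
def pvPart (p comp : List Int) : Prop :=
  ∀ x y : Int, pvInR p x → pvInR p y →
    (pvRoot p x = pvRoot p y ↔ pvGetI comp x = pvGetI comp y)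

set_option maxHeartbeats 1000000 in
lemma pvLoop_eq (n : Int) : ∀ (es : List (Int × Int × Int)) (p rk comp : List Int)
    (cost used : Int),
    pvWf p rk → comp.length = p.length → pvPart p comp →
    (∀ e ∈ es, PySem.Raise.InRange p.length e.2.1 ∧ PySem.Raise.InRange p.length e.2.2) →
    pvLoopA n es p rk cost used = pvLoopB n es comp cost used := by
  intro es
  induction es with
  | nil => intro p rk comp cost used _ _ _ _; rfl
  | cons e rest ih =>
    obtain ⟨w, u, v⟩ := e
    intro p rk comp cost used hwf hclen hpart hrange
    obtain ⟨hu, hv⟩ := hrange (w, u, v) List.mem_cons_self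
    have hrest := fun e he => hrange e (List.mem_cons_of_mem _ he)
    obtain ⟨hUlen, hUwf, hUflag, hUpart⟩ := pvUnion_spec hwf hu hv
    simp only [pvLoopA, pvLoopB]
    set U := pvUnionA p rk u v with hUdef
    clear_value U
    clear hUdef
    set nu := pvNrm p.length u with hnu
    set nv := pvNrm p.length v with hnv
    obtain ⟨hnu0, hnu1⟩ := pvNrm_nonneg hu
    obtain ⟨hnv0, hnv1⟩ := pvNrm_nonneg hv
    have hnuI : pvInR p (pvNrm p.length u) := ⟨hnu0, hnu1⟩
    have hnvI : pvInR p (pvNrm p.length v) := ⟨hnv0, hnv1⟩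
    have hcu : PySem.List.pyGetD comp u 0 = pvGetI comp nu := by
      rw [pvGet_nrm comp u (by rw [hclen]; exact hu), hclen]
    have hcv : PySem.List.pyGetD comp v 0 = pvGetI comp nv := by
      rw [pvGet_nrm comp v (by rw [hclen]; exact hv), hclen]
    have hiff : U.2.2 = true ↔
        pvGetI comp nu ≠ pvGetI comp nv := by
      rw [hUflag]
      exact not_congr (hpart _ _ hnuI hnvI)
    have hinr : ∀ x : Int, pvInR U.1 x ↔ pvInR p x := by
      intro x
      unfold pvInR
      rw [hUlen]
    rw [hcu, hcv]
    by_cases hb : U.2.2 = true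
    · have hne : pvGetI comp nu ≠ pvGetI comp nv :=
        hiff.mp hb
      rw [if_pos hb, if_pos hne]
      by_cases hdone : used + 1 = n
      · rw [if_pos hdone, if_pos hdone]
      · rw [if_neg hdone, if_neg hdone]
        apply ih
        · exact hUwf
        · rw [List.length_map, hclen, hUlen]
        · intro x y hx hy
          have hx' : pvInR p x := (hinr x).mp hx
          have hy' : pvInR p y := (hinr y).mp hy
          rw [hUpart x y hx' hy',
            pvGetI_map _ comp x hx'.1 (by rw [hclen]; exact hx'.2),
            pvGetI_map _ comp y hy'.1 (by rw [hclen]; exact hy'.2),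
            pvMergeIff (pvGetI comp x) (pvGetI comp y) _ _ (Ne.symm hne)]
          rw [hpart x y hx' hy', hpart x (pvNrm p.length u) hx' hnuI,
            hpart x (pvNrm p.length v) hx' hnvI, hpart y (pvNrm p.length u) hy' hnuI,
            hpart y (pvNrm p.length v) hy' hnvI]
          tauto
        · intro e he
          rw [hUlen]
          exact hrest e he
    · have hne : ¬ pvGetI comp nu ≠ pvGetI comp nv :=
        fun h => hb (hiff.mpr h)
      have hReq : pvRoot p (pvNrm p.length u) = pvRoot p (pvNrm p.length v) := by
        by_contra hcon
        exact hb (hUflag.mpr hcon)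
      rw [if_neg hb, if_neg hne]
      apply ih
      · exact hUwf
      · rw [hclen, hUlen]
      · intro x y hx hy
        have hx' : pvInR p x := (hinr x).mp hx
        have hy' : pvInR p y := (hinr y).mp hy
        rw [hUpart x y hx' hy', ← hpart x y hx' hy']
        constructor
        · rintro (h | ⟨h1, h2⟩)
          · exact h
          · rw [hReq] at h1 h2
            rcases h1 with h1 | h1 <;> rcases h2 with h2 | h2 <;> exact h1.trans h2.symm
        · exact fun h => Or.inl h
      · intro e he
        rw [hUlen]
        exact hrest e he


set_option maxHeartbeats 1000000 in
lemma pvTop (weights : List Int) (edges : List (Int × Int × Int))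
    (hpre : Pre_computeMinimumCost weights edges) :
    computeMinimumCost weights edges = computeMinimumCost_alt weights edges := by
  unfold computeMinimumCost computeMinimumCost_alt
  set n : Int := (weights.length : Int) - 1 with hn
  set p0 := PySem.List.pyRange 0 (n + 1) 1 with hp0
  set rk0 := List.replicate (n + 1).toNat (0 : Int) with hrk0
  have hplen : p0.length = weights.length := by
    rw [hp0, PySem.List.length_pyRange_one]
    omega
  have hget0 : ∀ x : Int, pvInR p0 x → pvGetI p0 x = x := by
    intro x hx
    obtain ⟨hx0, hx1⟩ := hx
    have hlt : x.toNat < p0.length := by omega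
    unfold pvGetI
    rw [List.getD_eq_getElem?_getD, List.getElem?_eq_getElem hlt, Option.getD_some]
    simp only [hp0, PySem.List.getElem_pyRange_one]
    omega
  have hwf0 : pvWf p0 rk0 := by
    refine ⟨by rw [hrk0, List.length_replicate, hplen]; omega, ?_⟩
    intro x hx
    rw [hget0 x hx]
    exact ⟨hx, fun h => absurd rfl h⟩
  have hroot0 : ∀ x : Int, pvInR p0 x → pvRoot p0 x = x := by
    intro x hx
    exact pvRoot_of_fix (hget0 x hx) (by obtain ⟨a, b⟩ := hx; omega)
  have hpart0 : pvPart p0 p0 := by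
    intro x y hx hy
    rw [hroot0 x hx, hroot0 y hy, hget0 x hx, hget0 y hy]
  apply pvLoop_eq n _ p0 rk0 p0 0 0 hwf0 rfl hpart0
  intro e he
  rw [PySem.List.mem_sorted] at he
  rw [hplen]
  rcases List.mem_append.mp he with hm | hm
  · obtain ⟨t, ht, rfl⟩ := List.mem_map.mp hm
    obtain ⟨h1, h2⟩ := hpre t ht
    exact ⟨h1, h2⟩
  · obtain ⟨i, hi, rfl⟩ := List.mem_map.mp hm
    rw [List.mem_filter] at hi
    have hi2 := PySem.List.mem_pyRange_one.mp hi.1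
    constructor
    · constructor <;> simp <;> omega
    · constructor <;> simp <;> omega

-- ===== VERDICT (by name: the statement is the Claim_ definition above) =====
theorem computeMinimumCost_spec : Claim_equal_computeMinimumCost := by
  unfold Claim_equal_computeMinimumCost
  intro weights edges _hdom hpre
  unfold Spec_computeMinimumCost
  exact pvTop weights edges hpre
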